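-- pv_equiv track=rewrite | github.com/KseniaMuxamedova/heartPlay | game.py | elim_matches
-- ===== SOURCE A (Python) =====
-- def elim_matches(board):
--     elim_list = []
--     # Проверяет строки на наличие совпадений
--     for y in range(len(board)):
--         streak = 1
--         for x in range(1, len(board[y])):
--             if board[y][x] == board[y][x - 1] and board[y][x] != 0:
--                 streak += 1
--             else:
--                 streak = 1
--             if streak == 3:
--                 elim_list += [[y, x - 2]]
--                 elim_list += [[y, x - 1]]
--                 elim_list += [[y, x]]
--             elif streak > 3:
--                 elim_list += [[y, x]]
--     # Проверяет столбики на наличие совпадений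
--     for x in range(len(board[0])):
--         streak = 1
--         for y in range(1, len(board)):
--             if board[y][x] == board[y - 1][x] and board[y][x] != 0:
--                 streak += 1
--             else:
--                 streak = 1
--             if streak == 3:
--                 elim_list += [[y - 2, x]]
--                 elim_list += [[y - 1, x]]
--                 elim_list += [[y, x]]
--             elif streak > 3:
--                 elim_list += [[y, x]]
--
--     # Превращает все найденные совпадения в пустоты
--     for i in range(len(elim_list)):
--         y = elim_list[i][0]
--         x = elim_list[i][1]
--         board[y][x] = 0
--
--     return len(elim_list)
-- ===== SOURCE B (Python) =====
-- def _runs(seq):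
--     """Maximal runs of equal values: list of (start, length, value)."""
--     out = []
--     i = 0
--     n = len(seq)
--     while i < n:
--         j = i
--         while j < n and seq[j] == seq[i]:
--             j += 1
--         out.append((i, j - i, seq[i]))
--         i = j
--     return out
--
--
-- def elim_matches(board):
--     cells = []
--     for y, row in enumerate(board):
--         for s, l, v in _runs(row):
--             if v != 0 and l >= 3:
--                 cells.extend((y, x) for x in range(s, s + l))
--     for x in range(len(board[0])):
--         col = [board[y][x] for y in range(len(board))]
--         for s, l, v in _runs(col):
--             if v != 0 and l >= 3:
--                 cells.extend((y, x) for y in range(s, s + l))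
--     for y, x in cells:
--         board[y][x] = 0
--     return len(cells)
-- ===== Notes on version B (the rewrite author's own statement) =====
-- stated objective: alternative
-- what changed: Replaces A's stateful streak counter (increment/reset per cell, with a special triple-append when the streak hits 3) by a decomposition of each row/column into maximal runs of equal values, appending every coordinate of each nonzero run of length >= 3.
import Mathlib
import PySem

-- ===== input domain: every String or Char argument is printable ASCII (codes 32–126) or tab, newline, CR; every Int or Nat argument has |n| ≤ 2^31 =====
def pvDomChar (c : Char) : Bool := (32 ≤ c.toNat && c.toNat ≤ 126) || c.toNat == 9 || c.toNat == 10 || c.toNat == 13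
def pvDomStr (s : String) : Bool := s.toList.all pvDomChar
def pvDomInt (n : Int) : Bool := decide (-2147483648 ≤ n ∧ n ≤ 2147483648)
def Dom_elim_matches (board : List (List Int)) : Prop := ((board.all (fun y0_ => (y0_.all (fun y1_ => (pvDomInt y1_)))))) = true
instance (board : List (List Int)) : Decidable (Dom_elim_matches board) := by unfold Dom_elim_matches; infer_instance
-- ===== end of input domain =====

-- B replaces A's stateful streak counter by a decomposition of each row/column into maximal
-- runs of equal values (objective: alternative, same cost). Python A mutates `board` in place
-- (zeroes the matched cells); B performs the same mutation; the equivalence proved here is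
-- about the RETURN value only.

-- ===== PORT A =====
-- board[y][x]: in-range whenever Pre_ holds; `none` (Python IndexError) is defaulted to 0,
-- which Pre_ makes unreachable.
def pvElt (row : List Int) (x : Int) : Int := (PySem.List.pyGet? row x).getD 0

-- inner row loop: state (prev = board[y][x-1], x, streak, elim_list), one step per cell
def pvStreakRow (y prev x streak : Int) (elim : List (Int × Int)) : List Int → List (Int × Int)
  | [] => elim
  | c :: rest =>
    let streak' := if c = prev ∧ c ≠ 0 then streak + 1 else 1
    let elim' := if streak' = 3 then elim ++ [(y, x-2), (y, x-1), (y, x)]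
      else if 3 < streak' then elim ++ [(y, x)] else elim
    pvStreakRow y c (x+1) streak' elim' rest

-- inner column loop: same state, stepping through the remaining rows at column x
def pvStreakCol (x prev y streak : Int) (elim : List (Int × Int)) : List (List Int) → List (Int × Int)
  | [] => elim
  | r :: rest =>
    let c := pvElt r x
    let streak' := if c = prev ∧ c ≠ 0 then streak + 1 else 1
    let elim' := if streak' = 3 then elim ++ [(y-2, x), (y-1, x), (y, x)]
      else if 3 < streak' then elim ++ [(y, x)] else elim
    pvStreakCol x c (y+1) streak' elim' rest

-- outer row loop: for y in range(len(board))
def pvRowPass (y : Int) (elim : List (Int × Int)) : List (List Int) → List (Int × Int)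
  | [] => elim
  | row :: rest =>
    pvRowPass (y+1) (match row with | [] => elim | h :: t => pvStreakRow y h 1 1 elim t) rest

def elim_matches (board : List (List Int)) : Int :=
  let elim1 := pvRowPass 0 [] board
  let w : Int := ((board.headD []).length : Int)   -- len(board[0]); Pre_ excludes board = []
  let elim2 := (PySem.List.pyRange 0 w 1).foldl
    (fun elim x => match board with
      | [] => elim
      | r0 :: rs => pvStreakCol x (pvElt r0 x) 1 1 elim rs) elim1
  (elim2.length : Int)

-- ===== PORT B =====
-- _runs: maximal runs (start, length, value) of consecutive equal values
def pvRuns (i : Int) : List Int → List (Int × Int × Int)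
  | [] => []
  | v :: rest =>
    (i, ((1 + (rest.takeWhile (· == v)).length : Nat) : Int), v)
      :: pvRuns (i + 1 + (rest.takeWhile (· == v)).length) (rest.dropWhile (· == v))
  termination_by l => l.length
  decreasing_by
    have := List.length_dropWhile_le (· == v) rest
    simp; omega

-- cells contributed by one sequence: every coordinate of each nonzero run of length >= 3
def pvRunCells (cell : Int → Int × Int) (seq : List Int) : List (Int × Int) :=
  (pvRuns 0 seq).foldl
    (fun acc r => if r.2.2 ≠ 0 ∧ 3 ≤ r.2.1
      then acc ++ (PySem.List.pyRange r.1 (r.1 + r.2.1) 1).map cell else acc) []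

-- for y, row in enumerate(board)
def pvRowCellsPass (y : Int) (acc : List (Int × Int)) : List (List Int) → List (Int × Int)
  | [] => acc
  | row :: rest => pvRowCellsPass (y+1) (acc ++ pvRunCells (fun x => (y, x)) row) rest

def elim_matches_alt (board : List (List Int)) : Int :=
  let rowCs := pvRowCellsPass 0 [] board
  let w : Int := ((board.headD []).length : Int)   -- len(board[0]); Pre_ excludes board = []
  let colCs := (PySem.List.pyRange 0 w 1).foldl
    (fun acc x => acc ++ pvRunCells (fun y => (y, x)) (board.map (fun r => pvElt r x))) []
  ((rowCs ++ colCs).length : Int)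

-- ===== PRECONDITION & SPEC =====
-- Pre_ excludes exactly the inputs where Python A raises IndexError: the empty board
-- (len(board[0])) and ragged boards whose later rows are shorter than row 0 (the column pass
-- reads board[y][x] for every x < len(board[0])).
def Pre_elim_matches (board : List (List Int)) : Prop :=
  board ≠ [] ∧ ∀ row ∈ board, (board.headD []).length ≤ row.length
instance (board : List (List Int)) : Decidable (Pre_elim_matches board) := by
  unfold Pre_elim_matches; infer_instance

def pvWitness_elim_matches : List (List Int) := [[1, 1, 1], [2, 0, 2], [1, 2, 1]]

def Spec_elim_matches (board : List (List Int)) (out : Int) : Prop := out = elim_matches_alt board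
instance (board : List (List Int)) (out : Int) : Decidable (Spec_elim_matches board out) := by
  unfold Spec_elim_matches; infer_instance

-- ===== CLAIM (what is proved, stated in full; the proofs are below) =====
def Claim_equal_elim_matches : Prop := ∀ (board : List (List Int)),
  Dom_elim_matches board → Pre_elim_matches board → Spec_elim_matches board (elim_matches board)

-- ===== LEMMAS AND PROOFS =====

-- generic streak loop: both inner loops of A are instances (cell builds the coordinate pair)
def gStreak (cell : Int → Int × Int) (prev i streak : Int) (elim : List (Int × Int)) :
    List Int → List (Int × Int)
  | [] => elim
  | c :: rest =>
    let streak' := if c = prev ∧ c ≠ 0 then streak + 1 else 1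
    let elim' := if streak' = 3 then elim ++ [cell (i-2), cell (i-1), cell i]
      else if 3 < streak' then elim ++ [cell i] else elim
    gStreak cell c (i+1) streak' elim' rest

lemma pvStreakRow_eq_gStreak (y : Int) : ∀ (t : List Int) (prev x streak : Int) (elim),
    pvStreakRow y prev x streak elim t = gStreak (fun x => (y, x)) prev x streak elim t := by
  intro t
  induction t with
  | nil => intro _ _ _ _; rfl
  | cons c rest ih =>
    intro prev x streak elim
    simp only [pvStreakRow, gStreak]
    exact ih _ _ _ _

lemma pvStreakCol_eq_gStreak (x : Int) : ∀ (rows : List (List Int)) (prev y streak : Int) (elim),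
    pvStreakCol x prev y streak elim rows
      = gStreak (fun y => (y, x)) prev y streak elim (rows.map (fun r => pvElt r x)) := by
  intro rows
  induction rows with
  | nil => intro _ _ _ _; rfl
  | cons r rest ih =>
    intro prev y streak elim
    simp only [pvStreakCol, List.map_cons, gStreak]
    exact ih _ _ _ _

-- cells appended by the streak loop while consuming k copies of a nonzero value v,
-- entering at position x with streak s (the run so far occupies positions x-s .. x-1)
def segPos (cell : Int → Int × Int) (x s : Int) (k : Nat) : List (Int × Int) :=
  if 3 ≤ s then (PySem.List.pyRange x (x + k) 1).map cell
  else if 3 ≤ s + k then (PySem.List.pyRange (x - s) (x + k) 1).map cell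
  else []

lemma segPos_empty (cell) (x s : Int) : segPos cell x s 0 = [] := by
  unfold segPos
  have h1 : PySem.List.pyRange x (x + ((0:Nat):Int)) 1 = [] := by
    simp
  split_ifs with hc1 hc2
  · rw [h1]; simp
  · exfalso; push_cast at hc2; omega
  · rfl

lemma segPos_step (cell) (x s : Int) (hs : 1 ≤ s) (k : Nat) :
    (if s + 1 = 3 then [cell (x-2), cell (x-1), cell x]
      else if 3 < s + 1 then [cell x] else [])
      ++ segPos cell (x+1) (s+1) k = segPos cell x s (k+1) := by
  have hk : ((k+1 : Nat) : Int) = (k:Int) + 1 := by push_cast; ring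
  rcases lt_trichotomy s 2 with h1 | h2 | h3
  · -- s = 1
    have hs1 : s = 1 := by omega
    subst hs1
    rw [if_neg (show ¬((1:Int) + 1 = 3) by norm_num),
        if_neg (show ¬((3:Int) < 1 + 1) by norm_num), List.nil_append]
    unfold segPos
    rw [if_neg (show ¬((3:Int) ≤ 1 + 1) by norm_num),
        if_neg (show ¬((3:Int) ≤ 1) by norm_num), hk,
        show x + 1 - ((1:Int) + 1) = x - 1 by ring,
        show x + 1 + (k:Int) = x + ((k:Int) + 1) by ring,
        show (1:Int) + 1 + (k:Int) = 1 + ((k:Int) + 1) by ring]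
  · -- s = 2
    subst h2
    rw [if_pos (show (2:Int) + 1 = 3 by norm_num)]
    unfold segPos
    rw [if_pos (show (3:Int) ≤ 2 + 1 by norm_num),
        if_neg (show ¬((3:Int) ≤ 2) by norm_num), hk,
        if_pos (show (3:Int) ≤ 2 + ((k:Int) + 1) by omega),
        show x + 1 + (k:Int) = x + ((k:Int) + 1) by ring]
    have e1 : PySem.List.pyRange (x - 2) (x + ((k:Int)+1)) 1
        = (x-2) :: PySem.List.pyRange (x - 1) (x + ((k:Int)+1)) 1 := by
      have := PySem.List.pyRange_one_cons (a := x - 2) (b := x + ((k:Int)+1)) (by omega)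
      simpa [show x - 2 + 1 = x - 1 by ring] using this
    have e2 : PySem.List.pyRange (x - 1) (x + ((k:Int)+1)) 1
        = (x-1) :: PySem.List.pyRange x (x + ((k:Int)+1)) 1 := by
      have := PySem.List.pyRange_one_cons (a := x - 1) (b := x + ((k:Int)+1)) (by omega)
      simpa [show x - 1 + 1 = x by ring] using this
    have e3 : PySem.List.pyRange x (x + ((k:Int)+1)) 1
        = x :: PySem.List.pyRange (x+1) (x + ((k:Int)+1)) 1 :=
      PySem.List.pyRange_one_cons (by omega)
    rw [e1, e2, e3]
    simp only [List.map_cons, List.cons_append, List.nil_append]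
  · -- 3 ≤ s
    rw [if_neg (show ¬(s + 1 = 3) by omega), if_pos (show (3:Int) < s + 1 by omega)]
    unfold segPos
    rw [if_pos (show (3:Int) ≤ s + 1 by omega), if_pos (show (3:Int) ≤ s by omega), hk,
        show x + 1 + (k:Int) = x + ((k:Int) + 1) by ring]
    have e : PySem.List.pyRange x (x + ((k:Int)+1)) 1
        = x :: PySem.List.pyRange (x+1) (x + ((k:Int)+1)) 1 :=
      PySem.List.pyRange_one_cons (by omega)
    rw [e]
    simp only [List.map_cons, List.singleton_append]

lemma gStreak_replicate_pos (cell) (v : Int) (hv : v ≠ 0) :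
    ∀ (k : Nat) (x s : Int), 1 ≤ s → ∀ (elim rest),
    gStreak cell v x s elim (List.replicate k v ++ rest)
      = gStreak cell v (x + k) (s + k) (elim ++ segPos cell x s k) rest := by
  intro k
  induction k with
  | zero =>
    intro x s hs elim rest
    simp [segPos_empty]
  | succ k ih =>
    intro x s hs elim rest
    rw [List.replicate_succ, List.cons_append]
    show gStreak cell v x s elim (v :: (List.replicate k v ++ rest)) = _
    simp only [gStreak]
    rw [if_pos (show True ∧ v ≠ 0 from ⟨trivial, hv⟩)]
    rw [ih (x+1) (s+1) (by omega)]
    have hlift : (if s + 1 = 3 then elim ++ [cell (x-2), cell (x-1), cell x]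
        else if 3 < s + 1 then elim ++ [cell x] else elim)
        = elim ++ (if s + 1 = 3 then [cell (x-2), cell (x-1), cell x]
          else if 3 < s + 1 then [cell x] else []) := by
      split_ifs <;> simp
    rw [hlift, List.append_assoc, segPos_step cell x s hs k]
    congr 1 <;> push_cast <;> ring

lemma gStreak_replicate_zero (cell) :
    ∀ (k : Nat) (x : Int) (elim rest),
    gStreak cell 0 x 1 elim (List.replicate k 0 ++ rest)
      = gStreak cell 0 (x + k) 1 elim rest := by
  intro k
  induction k with
  | zero => intro x elim rest; simp
  | succ k ih =>
    intro x elim rest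
    rw [List.replicate_succ, List.cons_append]
    show gStreak cell 0 x 1 elim ((0:Int) :: (List.replicate k 0 ++ rest)) = _
    simp only [gStreak, ne_eq, not_true_eq_false, and_false, if_false]
    rw [ih (x+1)]
    norm_num
    congr 1
    omega

-- B's run cells, with the position base generalized
def gRunCells (cell : Int → Int × Int) (x : Int) (seq : List Int) : List (Int × Int) :=
  (pvRuns x seq).flatMap
    (fun r => if r.2.2 ≠ 0 ∧ 3 ≤ r.2.1
      then (PySem.List.pyRange r.1 (r.1 + r.2.1) 1).map cell else [])

lemma pvRunCells_eq_gRunCells (cell) (seq : List Int) :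
    pvRunCells cell seq = gRunCells cell 0 seq := by
  unfold pvRunCells gRunCells
  have hf : (fun (acc : List (Int × Int)) (r : Int × Int × Int) =>
      if r.2.2 ≠ 0 ∧ 3 ≤ r.2.1
        then acc ++ (PySem.List.pyRange r.1 (r.1 + r.2.1) 1).map cell else acc)
      = (fun acc r => acc ++ (if r.2.2 ≠ 0 ∧ 3 ≤ r.2.1
        then (PySem.List.pyRange r.1 (r.1 + r.2.1) 1).map cell else [])) := by
    funext acc r; split <;> simp
  rw [hf]
  exact PySem.List.foldl_append_eq_flatMap _ _ _

-- the core correspondence: A's streak loop over h :: t = B's run cells of h :: t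
lemma takeWhile_eq_replicate_self (l : List Int) (v : Int) :
    l.takeWhile (· == v) = List.replicate (l.takeWhile (· == v)).length v := by
  apply List.eq_replicate_of_mem
  intro b hb
  have := List.mem_takeWhile_imp hb
  simpa using this

lemma gRunCells_cons (cell) (x h : Int) (t : List Int) :
    gRunCells cell x (h :: t)
      = (if h ≠ 0 ∧ 3 ≤ ((1 + (t.takeWhile (· == h)).length : Nat) : Int)
          then (PySem.List.pyRange x (x + ((1 + (t.takeWhile (· == h)).length : Nat) : Int)) 1).map cell
          else [])
        ++ gRunCells cell (x + 1 + (t.takeWhile (· == h)).length) (t.dropWhile (· == h)) := by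
  unfold gRunCells
  rw [pvRuns]
  rfl

lemma gStreak_eq_runCells :
    ∀ (n : Nat) (t : List Int), t.length ≤ n → ∀ (cell) (h x : Int) (elim),
    gStreak cell h (x + 1) 1 elim t = elim ++ gRunCells cell x (h :: t) := by
  intro n
  induction n with
  | zero =>
    intro t ht cell h x elim
    have h0 : t = [] := List.length_eq_zero_iff.mp (Nat.le_zero.mp ht)
    subst h0
    rw [gRunCells_cons]
    show elim = _
    norm_num [gRunCells, pvRuns]
  | succ n ih =>
    intro t ht cell h x elim
    have hsplit : t = List.replicate (t.takeWhile (· == h)).length h ++ t.dropWhile (· == h) := by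
      conv_lhs => rw [← List.takeWhile_append_dropWhile (p := (· == h)) (l := t)]
      rw [← takeWhile_eq_replicate_self]
    rw [gRunCells_cons]
    by_cases hv : h = 0
    · -- zero value: streak resets at every cell, no cells appended
      subst hv
      conv_lhs => rw [hsplit]
      rw [gStreak_replicate_zero]
      rw [if_neg (by simp)]
      rcases hd : List.dropWhile (· == (0:Int)) t with _ | ⟨h', t''⟩
      · simp [gRunCells, pvRuns, gStreak]
      · have hlen : t''.length ≤ n := by
          have hl := congrArg List.length hsplit
          rw [hd] at hl
          simp at hl
          omega
        show gStreak cell 0 (x + 1 + _) 1 elim (h' :: t'') = _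
        simp only [gStreak]
        rw [if_neg (by simp)]
        rw [if_neg (by norm_num), if_neg (by norm_num)]
        exact ih t'' hlen cell h' (x + 1 + (t.takeWhile (· == (0:Int))).length) elim
    · -- nonzero value: the whole run (length 1+k) is appended iff 1+k ≥ 3
      conv_lhs => rw [hsplit]
      rw [gStreak_replicate_pos cell h hv _ (x+1) 1 le_rfl]
      have hseg : segPos cell (x+1) 1 (t.takeWhile (· == h)).length
          = (if h ≠ 0 ∧ 3 ≤ ((1 + (t.takeWhile (· == h)).length : Nat) : Int)
              then (PySem.List.pyRange x (x + ((1 + (t.takeWhile (· == h)).length : Nat) : Int)) 1).map cell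
              else []) := by
        unfold segPos
        rw [if_neg (show ¬((3:Int) ≤ 1) by norm_num)]
        by_cases hb : (3:Int) ≤ 1 + ((t.takeWhile (· == h)).length : Int)
        · rw [if_pos hb, if_pos ⟨hv, by push_cast; omega⟩,
              show x + 1 - (1:Int) = x by ring,
              show x + 1 + ((t.takeWhile (· == h)).length : Int)
                = x + ((1 + (t.takeWhile (· == h)).length : Nat) : Int) by push_cast; ring]
        · rw [if_neg hb, if_neg (by push_cast at hb ⊢; intro hc; exact absurd hc.2 (by omega))]
      rcases hd : List.dropWhile (· == h) t with _ | ⟨h', t''⟩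
      · show elim ++ segPos cell (x+1) 1 (t.takeWhile (· == h)).length = _
        rw [hseg]
        simp [gRunCells, pvRuns]
      · have hh' : (h' == h) = false := by
          have hh := List.head?_dropWhile_not (· == h) t
          rw [hd] at hh
          simpa using hh
        have hlen : t''.length ≤ n := by
          have hl := congrArg List.length hsplit
          rw [hd] at hl
          simp at hl
          omega
        show gStreak cell h (x + 1 + _) (1 + _) (elim ++ _) (h' :: t'') = _
        simp only [gStreak]
        rw [if_neg (show ¬(h' = h ∧ h' ≠ 0) from fun hc => absurd hc.1 (by simpa using hh'))]
        rw [if_neg (by norm_num), if_neg (by norm_num)]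
        rw [ih t'' hlen cell h' (x + 1 + (t.takeWhile (· == h)).length)
          (elim ++ segPos cell (x+1) 1 (t.takeWhile (· == h)).length)]
        rw [hseg, List.append_assoc]

-- per-row: A's row handling = elim ++ B's row cells (empty row included)
lemma row_step (y : Int) (row : List Int) (elim : List (Int × Int)) :
    (match row with | [] => elim | h :: t => pvStreakRow y h 1 1 elim t)
      = elim ++ pvRunCells (fun x => (y, x)) row := by
  cases row with
  | nil => simp [pvRunCells, pvRuns]
  | cons h t =>
    show pvStreakRow y h 1 1 elim t = _
    rw [pvStreakRow_eq_gStreak, pvRunCells_eq_gRunCells]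
    have := gStreak_eq_runCells t.length t le_rfl (fun x => (y, x)) h 0 elim
    simpa using this

-- accumulator law for B's row pass
lemma pvRowCellsPass_acc : ∀ (rows : List (List Int)) (y : Int) (acc : List (Int × Int)),
    pvRowCellsPass y acc rows = acc ++ pvRowCellsPass y [] rows := by
  intro rows
  induction rows with
  | nil => intro y acc; simp [pvRowCellsPass]
  | cons row rest ih =>
    intro y acc
    simp only [pvRowCellsPass]
    rw [ih _ (acc ++ _), ih _ ([] ++ _)]
    simp

-- the two row passes agree
lemma rowPass_eq : ∀ (rows : List (List Int)) (y : Int) (elim : List (Int × Int)),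
    pvRowPass y elim rows = elim ++ pvRowCellsPass y [] rows := by
  intro rows
  induction rows with
  | nil => intro y elim; simp [pvRowPass, pvRowCellsPass]
  | cons row rest ih =>
    intro y elim
    simp only [pvRowPass, pvRowCellsPass]
    rw [row_step, ih, pvRowCellsPass_acc rest _ ([] ++ _)]
    simp

-- per-column: A's column handling = elim ++ B's column cells
lemma col_step (board : List (List Int)) (x : Int) (elim : List (Int × Int)) :
    (match board with
      | [] => elim
      | r0 :: rs => pvStreakCol x (pvElt r0 x) 1 1 elim rs)
      = elim ++ pvRunCells (fun y => (y, x)) (board.map (fun r => pvElt r x)) := by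
  cases board with
  | nil => simp [pvRunCells, pvRuns]
  | cons r0 rs =>
    show pvStreakCol x (pvElt r0 x) 1 1 elim rs = _
    rw [pvStreakCol_eq_gStreak, pvRunCells_eq_gRunCells]
    have := gStreak_eq_runCells (rs.map (fun r => pvElt r x)).length _ le_rfl
      (fun y => (y, x)) (pvElt r0 x) 0 elim
    simpa using this

-- ===== VERDICT (by name: the statement is the Claim_ definition above) =====
theorem elim_matches_spec : Claim_equal_elim_matches := by
  intro board hD hP
  clear hD hP
  have hfun : (fun (elim : List (Int × Int)) (x : Int) =>
      match board with
      | [] => elim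
      | r0 :: rs => pvStreakCol x (pvElt r0 x) 1 1 elim rs)
      = (fun acc x => acc ++ pvRunCells (fun y => (y, x)) (board.map (fun r => pvElt r x))) := by
    funext elim x; exact col_step board x elim
  show elim_matches board = elim_matches_alt board
  unfold elim_matches elim_matches_alt
  simp only [hfun, rowPass_eq, PySem.List.foldl_append_eq_flatMap]
  simp
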